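-- pv_equiv track=rewrite | github.com/frankerp05702/LeetCode | 24. Text Justification/solution1.py | line_format
-- ===== SOURCE A (Python) =====
-- from math import trunc
-- from typing import List
--
-- def line_format(words: List[str], maxWidth: int):
--     format = []
--     line_words, line_letters, line_spaces = 0, 0, 0
--     for w in words:
--         line_spaces = line_words - 1
--         if line_letters + len(w) + (line_spaces + 1) > maxWidth:
--             total_spaces = maxWidth - line_letters
--             if line_spaces > 0:
--                 spaces_per_tab = trunc(total_spaces / line_spaces)
--                 remain = total_spaces % line_spaces
--             else:
--                 spaces_per_tab = total_spaces
--                 remain = 0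
--             format.append({
--                 "line_words": line_words,
--                 "line_letters": line_letters,
--                 "line_spaces": line_spaces,
--                 "spaces_per_tab": spaces_per_tab,
--                 "remain": remain
--             })
--             line_letters = 0
--             line_words = 0
--         line_letters += len(w)
--         line_words += 1
--     return format
-- ===== SOURCE B (Python) =====
-- from math import trunc
-- from typing import List
--
-- def line_format(words: List[str], maxWidth: int):
--     # Pass 1: group the words into flushed lines, recording (word_count, letter_count).
--     groups = []
--     lw = ll = 0
--     for w in words:
--         if ll + len(w) + lw > maxWidth:
--             groups.append((lw, ll))
--             lw = ll = 0
--         ll += len(w)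
--         lw += 1
--     # The final un-flushed line is intentionally not emitted (as in the original).
--     # Pass 2: turn each group into its spacing record.
--     out = []
--     for lw, ll in groups:
--         sp = lw - 1
--         total = maxWidth - ll
--         if sp > 0:
--             per, rem = trunc(total / sp), total % sp
--         else:
--             per, rem = total, 0
--         out.append({
--             "line_words": lw,
--             "line_letters": ll,
--             "line_spaces": sp,
--             "spaces_per_tab": per,
--             "remain": rem,
--         })
--     return out
-- ===== Notes on version B (the rewrite author's own statement) =====
-- stated objective: alternative
-- what changed: Replaces A's single loop that interleaves grouping and spacing arithmetic with two passes: a first pass that only groups words into (count, letters) pairs, and a second pass that maps each pair to its spacing record.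
import Mathlib
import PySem

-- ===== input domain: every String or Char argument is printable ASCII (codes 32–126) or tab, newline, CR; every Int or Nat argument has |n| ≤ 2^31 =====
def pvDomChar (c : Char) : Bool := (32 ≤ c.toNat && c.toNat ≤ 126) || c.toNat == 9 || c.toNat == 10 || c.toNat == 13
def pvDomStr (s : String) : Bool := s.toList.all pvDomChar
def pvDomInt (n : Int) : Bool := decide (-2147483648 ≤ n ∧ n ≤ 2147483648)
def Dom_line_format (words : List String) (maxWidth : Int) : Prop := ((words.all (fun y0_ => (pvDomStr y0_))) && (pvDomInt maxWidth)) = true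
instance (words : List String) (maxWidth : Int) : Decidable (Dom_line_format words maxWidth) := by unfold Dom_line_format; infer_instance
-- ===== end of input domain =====

-- ===== PORT A =====
-- Port of A: one fold carrying (format, line_words, line_letters); `trunc(total/spaces)`
-- (float division then trunc) is ported as PySem.Int.truncdiv, exact at these magnitudes.
def line_format (words : List String) (maxWidth : Int) : List (List (String × Int)) :=
  (words.foldl
    (fun (st : List (List (String × Int)) × Int × Int) w =>
      let fmt := st.1
      let lw := st.2.1
      let ll := st.2.2
      let ls := lw - 1
      let wlen : Int := PySem.Str.len w
      if ll + wlen + (ls + 1) > maxWidth then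
        let total := maxWidth - ll
        let per := if ls > 0 then PySem.Int.truncdiv total ls else total
        let rem := if ls > 0 then PySem.Int.mod total ls else 0
        (fmt ++ [[("line_words", lw), ("line_letters", ll), ("line_spaces", ls),
                  ("spaces_per_tab", per), ("remain", rem)]], 0 + 1, 0 + wlen)
      else (fmt, lw + 1, ll + wlen))
    ([], 0, 0)).1

-- ===== PORT B =====
-- B helper: spacing record for one flushed group (second pass of Source B).
def pvRecord (maxWidth lw ll : Int) : List (String × Int) :=
  let sp := lw - 1
  let total := maxWidth - ll
  let per := if sp > 0 then PySem.Int.truncdiv total sp else total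
  let rem := if sp > 0 then PySem.Int.mod total sp else 0
  [("line_words", lw), ("line_letters", ll), ("line_spaces", sp),
   ("spaces_per_tab", per), ("remain", rem)]

-- Port of B: pass 1 groups words into (count, letters) pairs, pass 2 maps pvRecord over them.
def line_format_alt (words : List String) (maxWidth : Int) : List (List (String × Int)) :=
  let groups := (words.foldl
    (fun (st : List (Int × Int) × Int × Int) w =>
      let gs := st.1
      let lw := st.2.1
      let ll := st.2.2
      let wlen : Int := PySem.Str.len w
      if ll + wlen + lw > maxWidth then
        (gs ++ [(lw, ll)], 0 + 1, 0 + wlen)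
      else (gs, lw + 1, ll + wlen))
    ([], 0, 0)).1
  groups.map (fun p => pvRecord maxWidth p.1 p.2)

-- ===== PRECONDITION & SPEC =====
def Spec_line_format (words : List String) (maxWidth : Int) (out : List (List (String × Int))) : Prop := out = line_format_alt words maxWidth
instance (words : List String) (maxWidth : Int) (out : List (List (String × Int))) : Decidable (Spec_line_format words maxWidth out) := by unfold Spec_line_format; infer_instance

-- ===== CLAIM (what is proved, stated in full; the proofs are below) =====
def Claim_equal_line_format : Prop := ∀ (words : List String) (maxWidth : Int), Dom_line_format words maxWidth → Spec_line_format words maxWidth (line_format words maxWidth)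

-- ===== LEMMAS AND PROOFS =====

-- Invariant: A's fold state is B's fold state with the accumulated groups mapped through pvRecord.
theorem pv_loop_eq (maxWidth : Int) (words : List String) (gs : List (Int × Int)) (lw ll : Int) :
    (words.foldl
      (fun (st : List (List (String × Int)) × Int × Int) w =>
        let fmt := st.1
        let lw := st.2.1
        let ll := st.2.2
        let ls := lw - 1
        let wlen : Int := PySem.Str.len w
        if ll + wlen + (ls + 1) > maxWidth then
          let total := maxWidth - ll
          let per := if ls > 0 then PySem.Int.truncdiv total ls else total
          let rem := if ls > 0 then PySem.Int.mod total ls else 0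
          (fmt ++ [[("line_words", lw), ("line_letters", ll), ("line_spaces", ls),
                    ("spaces_per_tab", per), ("remain", rem)]], 0 + 1, 0 + wlen)
        else (fmt, lw + 1, ll + wlen))
      (gs.map (fun p => pvRecord maxWidth p.1 p.2), lw, ll)).1
    =
    ((words.foldl
      (fun (st : List (Int × Int) × Int × Int) w =>
        let gs := st.1
        let lw := st.2.1
        let ll := st.2.2
        let wlen : Int := PySem.Str.len w
        if ll + wlen + lw > maxWidth then
          (gs ++ [(lw, ll)], 0 + 1, 0 + wlen)
        else (gs, lw + 1, ll + wlen))
      (gs, lw, ll)).1).map (fun p => pvRecord maxWidth p.1 p.2) := by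
  induction words generalizing gs lw ll with
  | nil => simp
  | cons w ws ih =>
    simp only [List.foldl_cons]
    have hc : ll + (PySem.Str.len w : Int) + ((lw - 1) + 1) = ll + PySem.Str.len w + lw := by ring
    by_cases h : ll + (PySem.Str.len w : Int) + lw > maxWidth
    · simp only [hc, if_pos h]
      have := ih (gs ++ [(lw, ll)]) (0 + 1) (0 + PySem.Str.len w)
      simpa [pvRecord, List.map_append] using this
    · simp only [hc, if_neg h]
      exact ih gs (lw + 1) (ll + PySem.Str.len w)

-- ===== VERDICT (by name: the statement is the Claim_ definition above) =====
theorem line_format_spec : Claim_equal_line_format := by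
  intro words maxWidth _
  unfold Spec_line_format line_format line_format_alt
  simpa using pv_loop_eq maxWidth words [] 0 0
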